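-- pv_equiv track=rewrite | github.com/SevWren/MineStreakerContrastCampaign | gameworks/tests/unit/test_mine_placement.py | _safe_neighbours
-- ===== SOURCE A (Python) =====
-- def _safe_neighbours(sx: int, sy: int, w: int, h: int):
--     """Return all cells in the 3×3 neighbourhood of (sx, sy) within bounds."""
--     cells = set()
--     for dy in range(-1, 2):
--         for dx in range(-1, 2):
--             nx, ny = sx + dx, sy + dy
--             if 0 <= nx < w and 0 <= ny < h:
--                 cells.add((nx, ny))
--     return cells
-- ===== SOURCE B (Python) =====
-- def _safe_neighbours(sx: int, sy: int, w: int, h: int):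
--     """Return all cells in the 3x3 neighbourhood of (sx, sy) within bounds.
--
--     Computes the clamped in-bounds rectangle once and then enumerates it with a
--     single linear index k, decoding row/column with divmod -- no nested loops
--     and no per-cell bounds test.
--     """
--     x0, x1 = max(0, sx - 1), min(w, sx + 2)
--     y0, y1 = max(0, sy - 1), min(h, sy + 2)
--     if x1 <= x0 or y1 <= y0:
--         return set()
--     nx = x1 - x0
--     cells = set()
--     for k in range(nx * (y1 - y0)):
--         q, r = divmod(k, nx)
--         cells.add((x0 + r, y0 + q))
--     return cells
-- ===== Notes on version B (the rewrite author's own statement) =====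
-- stated objective: alternative
-- what changed: B replaces A's nested offset loops with nine per-cell bounds tests by computing the clamped in-bounds rectangle once and enumerating it with a single linear index, decoding each cell with divmod.
import Mathlib
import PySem

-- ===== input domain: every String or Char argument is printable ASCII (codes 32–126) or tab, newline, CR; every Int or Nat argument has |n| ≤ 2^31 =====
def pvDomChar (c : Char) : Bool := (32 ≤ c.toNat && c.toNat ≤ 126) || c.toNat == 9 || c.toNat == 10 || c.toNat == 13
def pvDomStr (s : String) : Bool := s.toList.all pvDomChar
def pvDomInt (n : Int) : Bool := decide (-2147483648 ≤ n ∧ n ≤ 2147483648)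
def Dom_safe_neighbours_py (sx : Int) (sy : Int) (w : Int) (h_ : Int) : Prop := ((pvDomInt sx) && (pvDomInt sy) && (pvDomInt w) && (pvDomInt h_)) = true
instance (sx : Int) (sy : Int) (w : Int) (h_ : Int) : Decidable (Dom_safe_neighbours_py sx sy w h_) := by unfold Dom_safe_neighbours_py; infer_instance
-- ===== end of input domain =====

-- B computes the clamped in-bounds rectangle once and enumerates it with a single
-- linear index decoded by divmod, instead of A's nested offset loops with a
-- per-cell bounds test (objective: alternative).

-- ===== PORT A =====
def safe_neighbours_py (sx : Int) (sy : Int) (w : Int) (h_ : Int) : List (Int × Int) :=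
  (PySem.List.pyRange (-1) 2 1).foldl (fun cells dy =>
    (PySem.List.pyRange (-1) 2 1).foldl (fun cells dx =>
      if 0 ≤ sx + dx ∧ sx + dx < w ∧ 0 ≤ sy + dy ∧ sy + dy < h_ then
        PySem.Set.add cells (sx + dx, sy + dy)
      else cells) cells)
    (PySem.Set.empty : PySem.Set (Int × Int))

-- ===== PORT B =====
def safe_neighbours_py_alt (sx : Int) (sy : Int) (w : Int) (h_ : Int) : List (Int × Int) :=
  let x0 := max 0 (sx - 1); let x1 := min w (sx + 2)
  let y0 := max 0 (sy - 1); let y1 := min h_ (sy + 2)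
  if x1 ≤ x0 ∨ y1 ≤ y0 then (PySem.Set.empty : PySem.Set (Int × Int))
  else
    let nx := x1 - x0
    (PySem.List.pyRange 0 (nx * (y1 - y0)) 1).foldl (fun cells k =>
      PySem.Set.add cells (x0 + PySem.Int.mod k nx, y0 + PySem.Int.floordiv k nx))
      (PySem.Set.empty : PySem.Set (Int × Int))

-- ===== PRECONDITION & SPEC =====
def Spec_safe_neighbours_py (sx : Int) (sy : Int) (w : Int) (h_ : Int) (out : List (Int × Int)) : Prop := out = safe_neighbours_py_alt sx sy w h_
instance (sx : Int) (sy : Int) (w : Int) (h_ : Int) (out : List (Int × Int)) : Decidable (Spec_safe_neighbours_py sx sy w h_ out) := by unfold Spec_safe_neighbours_py; infer_instance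

-- ===== CLAIM (what is proved, stated in full; the proofs are below) =====
def Claim_equal_safe_neighbours_py : Prop := ∀ (sx : Int) (sy : Int) (w : Int) (h_ : Int), Dom_safe_neighbours_py sx sy w h_ → Spec_safe_neighbours_py sx sy w h_ (safe_neighbours_py sx sy w h_)

-- ===== LEMMAS AND PROOFS =====

-- the clamped 3-wide range equals the bounds-filtered list of the three candidate coordinates
theorem pv_axis (s b : Int) :
    PySem.List.pyRange (max 0 (s - 1)) (min b (s + 2)) 1
      = ([s - 1, s, s + 1] : List Int).filter (fun x => decide (0 ≤ x ∧ x < b)) := by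
  have h1 := PySem.List.pairwise_lt_pyRange_one (max 0 (s-1)) (min b (s+2))
  have h2 : ([s-1, s, s+1] : List Int).Pairwise (· < ·) := by simp
  have h2f := h2.filter (fun x => decide (0 ≤ x ∧ x < b))
  have hmem : ∀ x : Int,
      x ∈ PySem.List.pyRange (max 0 (s - 1)) (min b (s + 2)) 1
        ↔ x ∈ ([s - 1, s, s + 1] : List Int).filter (fun x => decide (0 ≤ x ∧ x < b)) := by
    intro x
    simp [PySem.List.mem_pyRange_one, List.mem_filter]
    omega
  have hp := (List.perm_ext_iff_of_nodup h1.nodup h2f.nodup).mpr hmem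
  exact hp.eq_of_pairwise (fun a b _ _ hab hba => le_antisymm hab hba)
    (h1.imp le_of_lt) (h2f.imp le_of_lt)

-- A's inner loop (one row): conditional set-adds = one update with the filtered mapped row
theorem pv_inner (sx sy w h_ a : Int) (X : List Int) (s : PySem.Set (Int × Int)) :
    X.foldl (fun cells dx =>
      if 0 ≤ sx + dx ∧ sx + dx < w ∧ 0 ≤ sy + a ∧ sy + a < h_ then
        PySem.Set.add cells (sx + dx, sy + a)
      else cells) s
      = PySem.Set.update s
          ((X.filter (fun dx => decide (0 ≤ sx + dx ∧ sx + dx < w ∧ 0 ≤ sy + a ∧ sy + a < h_))).map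
            (fun dx => (sx + dx, sy + a))) := by
  induction X generalizing s with
  | nil => simp [PySem.Set.update]
  | cons x t ih =>
    rw [List.foldl_cons, List.filter_cons]
    by_cases h : 0 ≤ sx + x ∧ sx + x < w ∧ 0 ≤ sy + a ∧ sy + a < h_
    · rw [if_pos h, decide_eq_true h, if_pos rfl, List.map_cons, ih, PySem.Set.update_cons]
    · rw [if_neg h, decide_eq_false h, ih]
      simp

-- A's nested loops = one update with the flatMap of the filtered mapped rows
theorem pv_nested (sx sy w h_ : Int) (Y X : List Int) (s : PySem.Set (Int × Int)) :
    Y.foldl (fun cells dy =>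
      X.foldl (fun cells dx =>
        if 0 ≤ sx + dx ∧ sx + dx < w ∧ 0 ≤ sy + dy ∧ sy + dy < h_ then
          PySem.Set.add cells (sx + dx, sy + dy)
        else cells) cells) s
      = PySem.Set.update s (Y.flatMap (fun dy =>
          ((X.filter (fun dx => decide (0 ≤ sx + dx ∧ sx + dx < w ∧ 0 ≤ sy + dy ∧ sy + dy < h_))).map
            (fun dx => (sx + dx, sy + dy))))) := by
  induction Y generalizing s with
  | nil => simp [PySem.Set.update]
  | cons a t ih =>
    rw [List.foldl_cons, List.flatMap_cons, pv_inner sx sy w h_ a X s, ih,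
      PySem.Set.update_append]

-- A equals the set of the row-major enumeration of the clamped rectangle
theorem pv_A_eq (sx sy w h_ : Int) :
    safe_neighbours_py sx sy w h_
      = PySem.Set.ofList
          ((PySem.List.pyRange (max 0 (sy - 1)) (min h_ (sy + 2)) 1).flatMap
            (fun ny => (PySem.List.pyRange (max 0 (sx - 1)) (min w (sx + 2)) 1).map
              (fun nx => (nx, ny)))) := by
  unfold safe_neighbours_py
  rw [pv_nested, PySem.Set.update_empty]
  congr 1
  rw [pv_axis sy h_, pv_axis sx w]
  have hr : PySem.List.pyRange (-1) 2 1 = [-1, 0, 1] := by decide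
  rw [hr]
  simp only [List.flatMap_cons, List.flatMap_nil, List.filter_cons, List.filter_nil,
    List.append_nil]
  norm_num
  by_cases hx1 : 1 ≤ sx ∧ sx ≤ w <;> by_cases hx2 : 0 ≤ sx ∧ sx < w <;>
    by_cases hx3 : 0 ≤ sx + 1 ∧ sx + 1 < w <;> by_cases hy1 : 1 ≤ sy ∧ sy ≤ h_ <;>
    by_cases hy2 : 0 ≤ sy ∧ sy < h_ <;> by_cases hy3 : 0 ≤ sy + 1 ∧ sy + 1 < h_ <;>
    first
      | omega
      | (simp [hx1, hx2, hx3, hy1, hy2, hy3, List.cons.injEq, Prod.mk.injEq] <;> omega)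

-- linear-index enumeration with divmod decoding = row-major double enumeration
theorem pv_lin (x0 y0 m : Int) (hm : 0 < m) (n : Nat) :
    (PySem.List.pyRange 0 (m * n) 1).map
        (fun k => ((x0 + PySem.Int.mod k m, y0 + PySem.Int.floordiv k m) : Int × Int))
      = (List.range n).flatMap
          (fun (j : Nat) => (List.range m.toNat).map
            (fun (i : Nat) => ((x0 + (i : Int), y0 + (j : Int)) : Int × Int))) := by
  induction n with
  | zero => simp [PySem.List.pyRange_one_eq_nil]
  | succ n ih =>
    have h1 : (0 : Int) ≤ m * n := by positivity
    have h2 : m * n ≤ m * (n + 1) := by nlinarith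
    rw [show ((n + 1 : Nat) : Int) = (n : Int) + 1 by push_cast; ring,
      mul_add, mul_one]
    rw [PySem.List.pyRange_one_append 0 (m * n) (m * n + m) h1 (by linarith),
      List.map_append, ih, List.range_succ, List.flatMap_append]
    congr 1
    rw [PySem.List.pyRange_one (m * (n : Int)) (m * (n : Int) + m),
      show m * (n : Int) + m - m * (n : Int) = m by ring, List.map_map]
    simp only [List.flatMap_cons, List.flatMap_nil, List.append_nil]
    apply List.map_congr_left
    intro i hi
    simp only [List.mem_range] at hi
    have hi' : (i : Int) < m := by omega
    have hmod : PySem.Int.mod (m * (n : Int) + (i : Int)) m = (i : Int) := by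
      rw [PySem.Int.mod_eq_emod_of_pos hm, add_comm, Int.add_mul_emod_self_left]
      exact Int.emod_eq_of_lt (by positivity) hi'
    have hdiv : PySem.Int.floordiv (m * (n : Int) + (i : Int)) m = (n : Int) := by
      rw [PySem.Int.floordiv_eq_iff_of_pos hm]
      constructor <;> nlinarith
    simp [Function.comp, hmod, hdiv]

-- ===== VERDICT (by name: the statement is the Claim_ definition above) =====
theorem safe_neighbours_py_spec : Claim_equal_safe_neighbours_py := by
  intro sx sy w h_ _
  unfold Spec_safe_neighbours_py safe_neighbours_py_alt
  rw [pv_A_eq]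
  simp only []
  by_cases hdeg : min w (sx + 2) ≤ max 0 (sx - 1) ∨ min h_ (sy + 2) ≤ max 0 (sy - 1)
  · rw [if_pos hdeg]
    rcases hdeg with h | h
    · rw [show PySem.List.pyRange (max 0 (sx - 1)) (min w (sx + 2)) 1 = []
        from PySem.List.pyRange_one_eq_nil h]
      rw [List.flatMap_eq_nil_iff.mpr (by intro x hx; rfl)]
      rfl
    · rw [show PySem.List.pyRange (max 0 (sy - 1)) (min h_ (sy + 2)) 1 = []
        from PySem.List.pyRange_one_eq_nil h]
      rfl
  · rw [if_neg hdeg]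
    push Not at hdeg
    obtain ⟨hx, hy⟩ := hdeg
    set x0 := max 0 (sx - 1) with hx0
    set x1 := min w (sx + 2) with hx1
    set y0 := max 0 (sy - 1) with hy0
    set y1 := min h_ (sy + 2) with hy1
    have hm : 0 < x1 - x0 := by omega
    have hB : (PySem.List.pyRange 0 ((x1 - x0) * (y1 - y0)) 1).foldl
          (fun cells k => PySem.Set.add cells
            (x0 + PySem.Int.mod k (x1 - x0), y0 + PySem.Int.floordiv k (x1 - x0)))
          (PySem.Set.empty : PySem.Set (Int × Int))
        = PySem.Set.ofList ((PySem.List.pyRange 0 ((x1 - x0) * (y1 - y0)) 1).map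
            (fun k => (x0 + PySem.Int.mod k (x1 - x0), y0 + PySem.Int.floordiv k (x1 - x0)))) := by
      rw [PySem.Set.ofList_eq_foldl, List.foldl_map]
      rfl
    rw [hB]
    congr 1
    rw [show y1 - y0 = ((y1 - y0).toNat : Int) by omega, pv_lin x0 y0 (x1 - x0) hm]
    rw [PySem.List.pyRange_one y0 y1, PySem.List.pyRange_one x0 x1]
    rw [List.flatMap_map]
    rw [show (y1 - y0).toNat = ((y1 - y0).toNat : Int).toNat by omega]
    simp [Function.comp_def]
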